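-- pv_equiv track=rewrite | github.com/acailic/agent_debugger | collector/replay_collapse.py | _find_contiguous_low_value_runs
-- ===== SOURCE A (Python) =====
-- def _find_contiguous_low_value_runs(
--     num_events: int, protected: set[int], min_segment_length: int
-- ) -> list[tuple[int, int]]:
--     """Find contiguous runs of unprotected indices that meet minimum length."""
--     segments: list[tuple[int, int]] = []
--     run_start: int | None = None
--
--     for i in range(num_events):
--         if i not in protected:
--             if run_start is None:
--                 run_start = i
--         else:
--             if run_start is not None:
--                 run_length = i - run_start
--                 if run_length >= min_segment_length:
--                     segments.append((run_start, i - 1))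
--                 run_start = None
--
--     # Handle trailing run
--     if run_start is not None:
--         run_length = num_events - run_start
--         if run_length >= min_segment_length:
--             segments.append((run_start, num_events - 1))
--
--     return segments
-- ===== SOURCE B (Python) =====
-- def _find_contiguous_low_value_runs(
--     num_events: int, protected: set[int], min_segment_length: int
-- ) -> list[tuple[int, int]]:
--     """Find contiguous runs of unprotected indices that meet minimum length.
--
--     Walks only the sorted protected indices and emits the gaps between
--     consecutive protected positions (plus the trailing gap), instead of
--     scanning every index while tracking an open-run state.
--     """
--     segments: list[tuple[int, int]] = []
--     start = 0
--     for p in sorted(x for x in protected if 0 <= x < num_events):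
--         gap = p - start
--         if gap > 0 and gap >= min_segment_length:
--             segments.append((start, p - 1))
--         start = p + 1
--     gap = num_events - start
--     if gap > 0 and gap >= min_segment_length:
--         segments.append((start, num_events - 1))
--     return segments
-- ===== Notes on version B (the rewrite author's own statement) =====
-- stated objective: alternative
-- what changed: Instead of scanning every index in range(num_events) while tracking an open-run state, B sorts the in-range protected indices and emits the gap between consecutive protected positions plus the trailing gap.
import Mathlib
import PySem

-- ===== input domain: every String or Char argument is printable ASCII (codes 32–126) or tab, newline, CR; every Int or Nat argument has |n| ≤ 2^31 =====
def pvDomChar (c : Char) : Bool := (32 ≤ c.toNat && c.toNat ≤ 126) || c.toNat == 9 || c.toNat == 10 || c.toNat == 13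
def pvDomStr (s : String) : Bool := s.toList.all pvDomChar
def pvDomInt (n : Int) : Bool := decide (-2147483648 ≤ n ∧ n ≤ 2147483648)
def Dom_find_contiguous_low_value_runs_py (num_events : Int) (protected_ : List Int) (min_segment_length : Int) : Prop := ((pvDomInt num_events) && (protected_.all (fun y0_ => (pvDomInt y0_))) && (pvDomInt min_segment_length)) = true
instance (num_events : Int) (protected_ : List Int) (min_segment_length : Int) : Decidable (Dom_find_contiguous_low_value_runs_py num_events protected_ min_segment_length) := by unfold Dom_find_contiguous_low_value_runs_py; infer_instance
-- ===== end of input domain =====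

-- B walks only the sorted protected indices and emits the gaps between consecutive protected positions instead of scanning every index with run state; equivalence of return values is proved.


-- ===== PORT A =====
-- loop body of A: state = (segments, run_start)
def stepA (protected_ : List Int) (min_segment_length : Int)
    (st : List (Int × Int) × Option Int) (i : Int) : List (Int × Int) × Option Int :=
  if protected_.contains i = false then
    match st.2 with
    | none => (st.1, some i)
    | some _ => st
  else
    match st.2 with
    | some rs => ((if min_segment_length ≤ i - rs then st.1 ++ [(rs, i - 1)] else st.1), none)
    | none => st

-- A's trailing-run handling after the loop
def finA (num_events min_segment_length : Int) (st : List (Int × Int) × Option Int) : List (Int × Int) :=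
  match st.2 with
  | some rs => if min_segment_length ≤ num_events - rs then st.1 ++ [(rs, num_events - 1)] else st.1
  | none => st.1

def find_contiguous_low_value_runs_py (num_events : Int) (protected_ : List Int) (min_segment_length : Int) : List (Int × Int) :=
  finA num_events min_segment_length
    ((PySem.List.pyRange 0 num_events 1).foldl (stepA protected_ min_segment_length) ([], none))

-- ===== PORT B =====
-- loop body of B: state = (segments, start of the current candidate gap)
def stepB (min_segment_length : Int) (st : List (Int × Int) × Int) (p : Int) : List (Int × Int) × Int :=
  ((if 0 < p - st.2 ∧ min_segment_length ≤ p - st.2 then st.1 ++ [(st.2, p - 1)] else st.1), p + 1)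

-- B's trailing-gap handling after the loop
def finB (num_events min_segment_length : Int) (st : List (Int × Int) × Int) : List (Int × Int) :=
  if 0 < num_events - st.2 ∧ min_segment_length ≤ num_events - st.2 then st.1 ++ [(st.2, num_events - 1)] else st.1

def find_contiguous_low_value_runs_py_alt (num_events : Int) (protected_ : List Int) (min_segment_length : Int) : List (Int × Int) :=
  finB num_events min_segment_length
    ((PySem.List.sorted (protected_.filter (fun x => decide (0 ≤ x ∧ x < num_events))) (fun x => x) false).foldl
      (stepB min_segment_length) ([], 0))

-- ===== PRECONDITION & SPEC =====
-- Pre_ only states that the list encoding the Python set argument `protected` holds distinct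
-- elements (the fixed convention for set[int]); it excludes no actual Python input of A.
def Pre_find_contiguous_low_value_runs_py (num_events : Int) (protected_ : List Int) (min_segment_length : Int) : Prop :=
  protected_.Nodup
instance (num_events : Int) (protected_ : List Int) (min_segment_length : Int) : Decidable (Pre_find_contiguous_low_value_runs_py num_events protected_ min_segment_length) := by unfold Pre_find_contiguous_low_value_runs_py; infer_instance

def pvWitness_find_contiguous_low_value_runs_py : Int × List Int × Int := (5, [1, 3], 1)

def Spec_find_contiguous_low_value_runs_py (num_events : Int) (protected_ : List Int) (min_segment_length : Int) (out : List (Int × Int)) : Prop := out = find_contiguous_low_value_runs_py_alt num_events protected_ min_segment_length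
instance (num_events : Int) (protected_ : List Int) (min_segment_length : Int) (out : List (Int × Int)) : Decidable (Spec_find_contiguous_low_value_runs_py num_events protected_ min_segment_length out) := by unfold Spec_find_contiguous_low_value_runs_py; infer_instance

-- ===== CLAIM (what is proved, stated in full; the proofs are below) =====
def Claim_equal_find_contiguous_low_value_runs_py : Prop := ∀ (num_events : Int) (protected_ : List Int) (min_segment_length : Int), Dom_find_contiguous_low_value_runs_py num_events protected_ min_segment_length → Pre_find_contiguous_low_value_runs_py num_events protected_ min_segment_length → Spec_find_contiguous_low_value_runs_py num_events protected_ min_segment_length (find_contiguous_low_value_runs_py num_events protected_ min_segment_length)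

-- ===== LEMMAS AND PROOFS =====

-- A's loop is a no-op across a block of unprotected indices once a run is open.
lemma foldA_unprot (ps : List Int) (m : Int) :
    ∀ (r : List Int) (segs : List (Int × Int)) (s : Int),
      (∀ i ∈ r, ps.contains i = false) →
      r.foldl (stepA ps m) (segs, some s) = (segs, some s) := by
  intro r
  induction r with
  | nil => intro segs s _; rfl
  | cons i r ih =>
    intro segs s h
    have hi : ps.contains i = false := h i (by simp)
    have hstep : stepA ps m (segs, some s) i = (segs, some s) := by
      simp only [stepA]; rw [hi]; rfl
    rw [List.foldl_cons, hstep]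
    exact ih segs s (fun j hj => h j (by simp [hj]))

-- Main invariant: scanning [a, num_events) with no open run equals emitting the gaps
-- delimited by the sorted protected indices L that lie in [a, num_events).
lemma main_invariant (ps : List Int) (m n : Int) :
    ∀ (L : List Int), L.Pairwise (· < ·) →
    ∀ (a : Int) (segs : List (Int × Int)),
      (∀ x ∈ L, a ≤ x ∧ x < n) →
      (∀ i : Int, a ≤ i → i < n → (ps.contains i = true ↔ i ∈ L)) →
      finA n m ((PySem.List.pyRange a n 1).foldl (stepA ps m) (segs, none))
        = finB n m (L.foldl (stepB m) (segs, a)) := by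
  intro L hL
  induction L with
  | nil =>
    intro a segs _ hmem
    by_cases han : a < n
    · have hca : ps.contains a = false := by
        cases h : ps.contains a with
        | false => rfl
        | true => exact absurd ((hmem a le_rfl han).mp h) (by simp)
      have hstep : stepA ps m (segs, none) a = (segs, some a) := by
        simp only [stepA]; rw [hca]; rfl
      rw [PySem.List.pyRange_one_cons han, List.foldl_cons, hstep,
        foldA_unprot ps m _ segs a ?_]
      · simp only [finA, finB, List.foldl_nil]
        split_ifs <;> first | rfl | omega
      · intro i hi
        have hb := (PySem.List.mem_pyRange_one).mp hi
        cases h : ps.contains i with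
        | false => rfl
        | true => exact absurd ((hmem i (by omega) (by omega)).mp h) (by simp)
    · rw [PySem.List.pyRange_one_eq_nil (by omega)]
      simp only [finA, finB, List.foldl_nil]
      split_ifs <;> first | rfl | omega
  | cons p L' ih =>
    intro a segs hbnd hmem
    have hpl : ∀ x ∈ L', p < x := by
      intro x hx; exact (List.pairwise_cons.mp hL).1 x hx
    have hL' : L'.Pairwise (· < ·) := (List.pairwise_cons.mp hL).2
    obtain ⟨hap, hpn⟩ := hbnd p (by simp)
    have hcp : ps.contains p = true := (hmem p hap hpn).mpr (by simp)
    have hsplit : PySem.List.pyRange a n 1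
        = (PySem.List.pyRange a p 1 ++ [p]) ++ PySem.List.pyRange (p + 1) n 1 := by
      rw [PySem.List.pyRange_one_append a (p + 1) n (by omega) (by omega),
        PySem.List.pyRange_one_append a p (p + 1) (by omega) (by omega),
        PySem.List.pyRange_one_singleton]
    set segs' : List (Int × Int) := if 0 < p - a ∧ m ≤ p - a then segs ++ [(a, p - 1)] else segs with hsegs'
    have hbnd' : ∀ x ∈ L', p + 1 ≤ x ∧ x < n := by
      intro x hx; exact ⟨by have := hpl x hx; omega, (hbnd x (by simp [hx])).2⟩
    have hmem' : ∀ i : Int, p + 1 ≤ i → i < n → (ps.contains i = true ↔ i ∈ L') := by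
      intro i h1 h2
      rw [hmem i (by omega) h2]
      simp only [List.mem_cons]
      constructor
      · rintro (rfl | h)
        · omega
        · exact h
      · exact fun h => Or.inr h
    have hB : (p :: L').foldl (stepB m) (segs, a) = L'.foldl (stepB m) (segs', p + 1) := by
      rw [List.foldl_cons]; rfl
    have hA : List.foldl (stepA ps m) (segs, none) (PySem.List.pyRange a p 1 ++ [p])
        = (segs', none) := by
      rcases eq_or_lt_of_le hap with rfl | halt
      · rw [PySem.List.pyRange_one_eq_nil (by omega), List.nil_append, List.foldl_cons,
          List.foldl_nil]
        have hst : stepA ps m (segs, none) a = (segs, none) := by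
          simp only [stepA]; rw [hcp]; simp
        rw [hst, hsegs']
        have hc : ¬ (0 < a - a ∧ m ≤ a - a) := by omega
        rw [if_neg hc]
      · have hca : ps.contains a = false := by
          cases h : ps.contains a with
          | false => rfl
          | true =>
            have := (hmem a le_rfl (by omega)).mp h
            simp only [List.mem_cons] at this
            rcases this with rfl | hmm
            · omega
            · have := hpl a hmm; omega
        have hstep : stepA ps m (segs, none) a = (segs, some a) := by
          simp only [stepA]; rw [hca]; rfl
        have hinner : List.foldl (stepA ps m) (segs, none) (PySem.List.pyRange a p 1)
            = (segs, some a) := by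
          rw [PySem.List.pyRange_one_cons halt, List.foldl_cons, hstep]
          refine foldA_unprot ps m _ segs a ?_
          intro i hi
          have hb := (PySem.List.mem_pyRange_one).mp hi
          cases h : ps.contains i with
          | false => rfl
          | true =>
            have := (hmem i (by omega) (by omega)).mp h
            simp only [List.mem_cons] at this
            rcases this with rfl | hmm
            · omega
            · have := hpl i hmm; omega
        rw [List.foldl_append, hinner, List.foldl_cons, List.foldl_nil]
        have hstp : stepA ps m (segs, some a) p
            = ((if m ≤ p - a then segs ++ [(a, p - 1)] else segs), none) := by
          simp only [stepA]; rw [hcp]; simp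
        rw [hstp, hsegs']
        have : (if 0 < p - a ∧ m ≤ p - a then segs ++ [(a, p - 1)] else segs)
            = (if m ≤ p - a then segs ++ [(a, p - 1)] else segs) := by
          split_ifs <;> first | rfl | omega
        rw [this]
    rw [hB, ← ih hL' (p + 1) segs' hbnd' hmem', hsplit, List.foldl_append, hA]

-- ===== VERDICT (by name: the statement is the Claim_ definition above) =====
theorem find_contiguous_low_value_runs_py_spec : Claim_equal_find_contiguous_low_value_runs_py := by
  intro n ps m _ hpre
  unfold Spec_find_contiguous_low_value_runs_py
  unfold find_contiguous_low_value_runs_py find_contiguous_low_value_runs_py_alt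
  set L := PySem.List.sorted (ps.filter (fun x => decide (0 ≤ x ∧ x < n))) (fun x => x) false with hLdef
  have hperm : L.Perm (ps.filter (fun x => decide (0 ≤ x ∧ x < n))) := PySem.List.sorted_perm _ _ _
  have hnodup : L.Nodup := hperm.nodup_iff.mpr (hpre.filter _)
  have hle : L.Pairwise (fun a b => (a : Int) ≤ b) := PySem.List.sorted_pairwise _ _
  have hlt : L.Pairwise (· < ·) := by
    have := hle.and hnodup
    exact this.imp (fun h => lt_of_le_of_ne h.1 h.2)
  have hmemL : ∀ x : Int, x ∈ L ↔ x ∈ ps ∧ 0 ≤ x ∧ x < n := by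
    intro x
    rw [hperm.mem_iff, List.mem_filter]
    simp
  refine main_invariant ps m n L hlt 0 [] ?_ ?_
  · intro x hx; exact ((hmemL x).mp hx).2
  · intro i h0 hn
    rw [hmemL i]
    simp [h0, hn]
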